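-- pv_equiv track=rewrite | github.com/mfessenden/vfx_assetmanager | maya/model.py | _cleanDagPath
-- ===== SOURCE A (Python) =====
-- def _cleanDagPath(olddag):
--     ''' removes namespaces from a given dagpath'''
--     newdag = []
--     oldList = olddag.split('|')
--     for ol in oldList:
--         ol = ol.split(':')[-1]
--         #newdag.append('|'+ol)
--         newdag.append(ol)
--
--     newdag = '|'.join(newdag)
--     return newdag
-- ===== SOURCE B (Python) =====
-- def _cleanDagPath(olddag):
--     ''' removes namespaces from a given dagpath (single character pass, no split/rejoin)'''
--     out = []
--     buf = []
--     for ch in olddag: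
--         if ch == '|':
--             out += buf
--             out.append('|')
--             buf = []
--         elif ch == ':':
--             buf = []
--         else:
--             buf.append(ch)
--     return ''.join(out + buf)
-- ===== Notes on version B (the rewrite author's own statement) =====
-- stated objective: alternative
-- what changed: Replaces split-on-'|' / per-segment split-on-':' / rejoin with a single left-to-right character pass keeping an output list and a current-segment buffer that is cleared at each ':' and flushed at each '|'; no intermediate list of segments is built.
import Mathlib
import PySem

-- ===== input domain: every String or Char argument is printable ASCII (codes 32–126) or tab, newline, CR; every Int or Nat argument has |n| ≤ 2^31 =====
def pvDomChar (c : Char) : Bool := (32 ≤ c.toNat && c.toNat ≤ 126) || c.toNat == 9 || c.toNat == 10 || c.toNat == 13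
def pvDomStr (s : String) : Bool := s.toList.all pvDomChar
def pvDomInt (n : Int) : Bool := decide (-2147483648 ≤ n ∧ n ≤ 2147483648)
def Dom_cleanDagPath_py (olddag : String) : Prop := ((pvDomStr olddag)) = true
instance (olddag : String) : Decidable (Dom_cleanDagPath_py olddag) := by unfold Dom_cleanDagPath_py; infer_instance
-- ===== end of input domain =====

-- B replaces A's split-on-'|'/per-segment-split-on-':'/rejoin with a single character pass over the string (alternative decomposition, same cost).

-- ===== PORT A =====
-- A: split on '|', for each piece take the part after the last ':', rejoin with '|'.
def cleanDagPath_py (olddag : String) : String :=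
  -- olddag.split('|'); split? is some because the separator is nonempty
  let oldList := (PySem.Str.split? olddag "|").getD []
  -- the for-loop appending ol.split(':')[-1]; split always returns a nonempty list, so [-1] is its last element
  let newdag := oldList.foldl
    (fun acc ol => acc ++ [((PySem.Str.split? ol ":").getD []).getLastD ""]) []
  PySem.Str.join "|" newdag

-- ===== PORT B =====
-- B's loop body: out/buf state; buf is cleared at ':' and flushed with a '|' at '|'.
def bStep (p : List Char × List Char) (ch : Char) : List Char × List Char :=
  if ch = '|' then (p.1 ++ p.2 ++ ['|'], [])
  else if ch = ':' then (p.1, [])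
  else (p.1, p.2 ++ [ch])

-- B: one pass; buf holds the current segment since the last '|' or ':'.
def cleanDagPath_py_alt (olddag : String) : String :=
  let st := olddag.toList.foldl bStep ([], [])
  String.ofList (st.1 ++ st.2)

-- ===== PRECONDITION & SPEC =====
def Spec_cleanDagPath_py (olddag : String) (out : String) : Prop := out = cleanDagPath_py_alt olddag
instance (olddag : String) (out : String) : Decidable (Spec_cleanDagPath_py olddag out) := by unfold Spec_cleanDagPath_py; infer_instance

-- ===== CLAIM (what is proved, stated in full; the proofs are below) =====
def Claim_equal_cleanDagPath_py : Prop := ∀ (olddag : String), Dom_cleanDagPath_py olddag → Spec_cleanDagPath_py olddag (cleanDagPath_py olddag)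

-- ===== LEMMAS AND PROOFS =====

-- reference single-character split
def splitC (c : Char) : List Char → List (List Char)
  | [] => [[]]
  | x :: rest => if x = c then [] :: splitC c rest
    else match splitC c rest with
      | [] => [[x]]
      | p :: ps => (x :: p) :: ps

def consHead (pre : List Char) : List (List Char) → List (List Char)
  | [] => [pre]
  | p :: ps => (pre ++ p) :: ps

theorem splitC_ne_nil (c : Char) (cs : List Char) : splitC c cs ≠ [] := by
  cases cs with
  | nil => simp [splitC]
  | cons x rest =>
    simp only [splitC]
    split
    · simp
    · split <;> simp_all

theorem go_eq (c : Char) : ∀ (fuel : Nat) (cs cur : List Char) (acc : List (List Char)),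
    cs.length < fuel →
    PySem.Chars.splitOn.go [c] fuel cs cur acc = acc.reverse ++ consHead cur.reverse (splitC c cs) := by
  intro fuel
  induction fuel with
  | zero => intro cs cur acc h; omega
  | succ n ih =>
    intro cs cur acc h
    cases cs with
    | nil => simp [PySem.Chars.splitOn.go, splitC, consHead]
    | cons x rest =>
      rw [PySem.Chars.splitOn.go]
      by_cases hx : x = c
      · subst hx
        simp only [List.isPrefixOf, beq_self_eq_true, Bool.true_and,
          if_pos, List.length_singleton, List.drop_succ_cons, List.drop_zero]
        rw [ih rest [] (cur.reverse :: acc) (by simpa using Nat.lt_of_succ_lt_succ h)]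
        simp only [splitC, consHead]
        cases hs : splitC x rest with
        | nil => exact absurd hs (splitC_ne_nil x rest)
        | cons p ps => simp
      · have hpre : ([c].isPrefixOf (x :: rest)) = false := by
          simp [List.isPrefixOf]; exact fun hcx => absurd hcx.symm hx
        rw [if_neg (by simp [hpre])]
        rw [ih rest (x :: cur) acc (by simpa using Nat.lt_of_succ_lt_succ h)]
        simp only [splitC, if_neg hx, List.reverse_cons]
        cases hs : splitC c rest with
        | nil => exact absurd hs (splitC_ne_nil c rest)
        | cons p ps => simp [consHead]

theorem splitOn_eq_splitC (c : Char) (cs : List Char) :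
    PySem.Chars.splitOn cs [c] = splitC c cs := by
  rw [PySem.Chars.splitOn, go_eq c (cs.length + 1) cs [] [] (by omega)]
  cases hs : splitC c cs with
  | nil => exact absurd hs (splitC_ne_nil c cs)
  | cons p ps => simp [consHead]

theorem splitC_append_of_not_mem (c : Char) (pre t : List Char) (h : c ∉ pre) :
    splitC c (pre ++ t) = consHead pre (splitC c t) := by
  induction pre with
  | nil =>
    cases hs : splitC c t with
    | nil => exact absurd hs (splitC_ne_nil c t)
    | cons p ps => simp [consHead, hs]
  | cons x xs ih =>
    have hx : x ≠ c := fun he => h (by simp [he])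
    have hxs : c ∉ xs := fun hm => h (by simp [hm])
    simp only [List.cons_append, splitC, if_neg hx, ih hxs]
    cases hs : splitC c t with
    | nil => exact absurd hs (splitC_ne_nil c t)
    | cons p ps => simp [consHead]

theorem splitC_of_not_mem (c : Char) (cs : List Char) (h : c ∉ cs) : splitC c cs = [cs] := by
  have := splitC_append_of_not_mem c cs [] h
  simpa [splitC, consHead] using this

-- the part after the last ':' of a segment
def lastSeg (s : List Char) : List Char := (splitC ':' s).getLastD []

theorem lastSeg_of_no_colon (s : List Char) (h : ':' ∉ s) : lastSeg s = s := by
  simp [lastSeg, splitC_of_not_mem ':' s h]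

theorem lastSeg_colon (buf p : List Char) (h : ':' ∉ buf) :
    lastSeg (buf ++ ':' :: p) = lastSeg p := by
  unfold lastSeg
  rw [splitC_append_of_not_mem ':' buf (':' :: p) h]
  rw [show splitC ':' (':' :: p) = [] :: splitC ':' p from by rw [splitC]; simp]
  cases hs : splitC ':' p with
  | nil => exact absurd hs (splitC_ne_nil ':' p)
  | cons q qs => simp [consHead]

theorem b_invariant : ∀ (cs out buf : List Char), ':' ∉ buf →
    (cs.foldl bStep (out, buf)).1 ++ (cs.foldl bStep (out, buf)).2 =
      out ++ PySem.Chars.join ['|'] ((consHead buf (splitC '|' cs)).map lastSeg) := by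
  intro cs
  induction cs with
  | nil =>
    intro out buf h
    simp [splitC, consHead, PySem.Chars.join_singleton, lastSeg_of_no_colon buf h]
  | cons ch rest ih =>
    intro out buf h
    by_cases h1 : ch = '|'
    · subst h1
      rw [List.foldl_cons, show bStep (out, buf) '|' = (out ++ buf ++ ['|'], []) from rfl]
      rw [ih (out ++ buf ++ ['|']) [] (by simp)]
      cases hs : splitC '|' rest with
      | nil => exact absurd hs (splitC_ne_nil '|' rest)
      | cons p ps =>
        rw [show splitC '|' ('|' :: rest) = [] :: splitC '|' rest from by rw [splitC]; simp, hs]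
        simp only [consHead, List.append_nil, List.map_cons,
          PySem.Chars.join_cons_cons, lastSeg_of_no_colon buf h]
        simp
    · by_cases h2 : ch = ':'
      · subst h2
        rw [List.foldl_cons, show bStep (out, buf) ':' = (out, []) from rfl]
        rw [ih out [] (by simp)]
        cases hs : splitC '|' rest with
        | nil => exact absurd hs (splitC_ne_nil '|' rest)
        | cons p ps =>
          rw [show splitC '|' (':' :: rest) = match splitC '|' rest with
                | [] => [[':']] | p :: ps => (':' :: p) :: ps from by rw [splitC]; simp, hs]
          simp only [consHead, List.map_cons]
          rw [lastSeg_colon buf p h]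
          cases hs2 : splitC '|' rest <;> simp_all [consHead]
      · rw [List.foldl_cons, show bStep (out, buf) ch = (out, buf ++ [ch]) from by
          simp [bStep, h1, h2]]
        have hbuf : ':' ∉ buf ++ [ch] := by
          intro hm
          rcases List.mem_append.mp hm with hm | hm
          · exact h hm
          · simp at hm; exact h2 hm.symm
        rw [ih out (buf ++ [ch]) hbuf]
        cases hs : splitC '|' rest with
        | nil => exact absurd hs (splitC_ne_nil '|' rest)
        | cons p ps =>
          rw [show splitC '|' (ch :: rest) = match splitC '|' rest with
                | [] => [[ch]] | p :: ps => (ch :: p) :: ps from by rw [splitC]; simp [h1], hs]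
          simp [consHead]

-- A's accumulator loop is a map
theorem foldl_append_singleton {α β : Type} (f : α → β) :
    ∀ (l : List α) (acc : List β),
      l.foldl (fun acc x => acc ++ [f x]) acc = acc ++ l.map f := by
  intro l
  induction l with
  | nil => simp
  | cons x xs ih => intro acc; simp [ih]

theorem getLastD_map {α β : Type} (f : α → β) (d : α) :
    ∀ (l : List α), (l.map f).getLastD (f d) = f (l.getLastD d) := by
  intro l
  induction l with
  | nil => simp
  | cons x xs ih =>
    cases xs with
    | nil => simp
    | cons y ys => simpa using ih

theorem split?_some (s sep : String) (h : sep.toList ≠ []) :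
    ∃ l, PySem.Str.split? s sep = some l ∧
      l.map String.toList = PySem.Chars.splitOn s.toList sep.toList := by
  have hm := PySem.Str.split?_map s sep
  rw [PySem.Chars.split?] at hm
  rw [if_neg (by simpa [List.isEmpty_iff] using h)] at hm
  rcases Option.map_eq_some_iff.mp hm with ⟨l, hl, hmap⟩
  exact ⟨l, hl, hmap⟩

-- ===== VERDICT (by name: the statement is the Claim_ definition above) =====
theorem cleanDagPath_py_spec : Claim_equal_cleanDagPath_py := by
  intro olddag _
  unfold Spec_cleanDagPath_py cleanDagPath_py cleanDagPath_py_alt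
  obtain ⟨l, hl, hmap⟩ := split?_some olddag "|" (by decide)
  rw [show ("|" : String).toList = ['|'] from rfl] at hmap
  rw [hl]
  simp only [Option.getD_some]
  rw [foldl_append_singleton, List.nil_append]
  have key : (l.map fun ol => ((PySem.Str.split? ol ":").getD []).getLastD "").map String.toList
      = (splitC '|' olddag.toList).map lastSeg := by
    rw [← splitOn_eq_splitC, ← hmap, List.map_map, List.map_map]
    apply List.map_congr_left
    intro ol _
    obtain ⟨m, hm, hmm⟩ := split?_some ol ":" (by decide)
    rw [show (":" : String).toList = [':'] from rfl] at hmm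
    simp only [Function.comp_apply, hm, Option.getD_some, lastSeg, ← splitOn_eq_splitC, ← hmm]
    have := getLastD_map String.toList "" m
    simpa using this.symm
  rw [b_invariant olddag.toList [] [] (by simp), List.nil_append]
  have hch : consHead ([] : List Char) (splitC '|' olddag.toList) = splitC '|' olddag.toList := by
    cases hs : splitC '|' olddag.toList with
    | nil => exact absurd hs (splitC_ne_nil '|' olddag.toList)
    | cons p ps => simp [consHead]
  rw [hch, PySem.Str.join, key]
  rfl
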